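-- pv_equiv track=rewrite | github.com/MethodsDev/mdl-sc-isoform-paper | src/mdl/sc_isoform_paper/priming.py | calc_longest_a
-- ===== SOURCE A (Python) =====
-- def calc_longest_a(seq: str, polya_window: int) -> int:
--     best_n = 0
--     curr_n = 0
--     for i, c in enumerate(seq):
--         if c == "A":
--             curr_n += 1
--         else:
--             best_n = max(curr_n, best_n)
--             curr_n = 0
--             if i > polya_window:
--                 break
--
--     return max(best_n, curr_n)
-- ===== SOURCE B (Python) =====
-- def calc_longest_a(seq: str, polya_window: int) -> int:
--     # Decide the scan boundary first: reading stops at the first non-A base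
--     # past the window (an A-run straddling the window edge counts in full).
--     stop = polya_window + 1
--     while stop < len(seq) and seq[stop] == "A":
--         stop += 1
--     prefix = seq[:stop]
--     # longest run of A's in that prefix, jumping run by run
--     best = 0
--     pos = 0
--     while pos < len(prefix):
--         if prefix[pos] == "A":
--             end = pos
--             while end < len(prefix) and prefix[end] == "A":
--                 end += 1
--             best = max(best, end - pos)
--             pos = end
--         else:
--             pos += 1
--     return best
-- ===== Notes on version B (the rewrite author's own statement) =====
-- stated objective: alternative
-- what changed: B decides the scan boundary first (extend the window through any straddling A-run), then measures the longest A-run of that prefix by jumping run to run, replacing A's single running-counter state machine with a break; Pre_ restricts to nonnegative polya_window, the natural domain (a window is a position count): on negative windows B's seq[stop] index would wrap or raise.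
-- outside the precondition, e.g. on calc_longest_a('CAC', -2): A returns 0, B returns 1; on calc_longest_a('A', -5): A returns 1, B raises IndexError
import Mathlib
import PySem

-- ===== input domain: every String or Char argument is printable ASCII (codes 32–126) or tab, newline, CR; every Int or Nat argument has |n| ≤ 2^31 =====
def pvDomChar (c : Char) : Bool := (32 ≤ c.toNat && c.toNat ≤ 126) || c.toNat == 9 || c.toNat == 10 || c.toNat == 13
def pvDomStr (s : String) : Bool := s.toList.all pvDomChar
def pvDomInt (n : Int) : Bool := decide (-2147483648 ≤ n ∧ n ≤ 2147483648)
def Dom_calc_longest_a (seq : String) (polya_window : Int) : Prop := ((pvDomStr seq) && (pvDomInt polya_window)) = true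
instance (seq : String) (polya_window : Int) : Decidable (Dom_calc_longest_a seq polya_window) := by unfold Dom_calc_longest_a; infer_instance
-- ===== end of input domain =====

-- B decides the scan boundary first (extend the window through any straddling A-run),
-- then measures the longest A-run of that prefix jumping run to run, instead of A's
-- running-counter state machine with a break.  Objective: alternative decomposition
-- (same asymptotic cost).  Pre_ restricts to nonnegative polya_window (see there).

-- ===== PORT A =====
-- the for-with-break over enumerate(seq): state (i, best_n, curr_n)
def calcALoop (cs : List Char) (i : Int) (best curr : Int) (pw : Int) : Int :=
  match cs with
  | [] => max best curr
  | c :: rest =>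
    if c = 'A' then calcALoop rest (i + 1) best (curr + 1) pw
    else if i > pw then max (max curr best) 0
    else calcALoop rest (i + 1) (max curr best) 0 pw

def calc_longest_a (seq : String) (polya_window : Int) : Int :=
  calcALoop seq.toList 0 0 0 polya_window

-- ===== PORT B =====
-- phase 1: 'while stop < len(seq) and seq[stop] == "A": stop += 1', as recursion over
-- the suffix seq[stop:] carrying the index stop
def bAdvance (rest : List Char) (stop : Nat) : Nat :=
  match rest with
  | [] => stop
  | c :: t => if c = 'A' then bAdvance t (stop + 1) else stop

-- phase 2: the outer while (skip non-A) and the inner while (measure a run), as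
-- mutual recursion over the remaining suffix of prefix
mutual
def bSkip (l : List Char) (best : Int) : Int :=
  match l with
  | [] => best
  | c :: t => if c = 'A' then bRun t 1 best else bSkip t best
def bRun (l : List Char) (k best : Int) : Int :=
  match l with
  | [] => max best k
  | c :: t => if c = 'A' then bRun t (k + 1) best else bSkip t (max best k)
end

def calc_longest_a_alt (seq : String) (polya_window : Int) : Int :=
  let cs := seq.toList
  let stop := bAdvance (cs.drop (polya_window + 1).toNat) (polya_window + 1).toNat
  bSkip (cs.take stop) 0

-- ===== PRECONDITION & SPEC =====
-- Pre_ excludes negative polya_window (on which A still returns a value): a window is a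
-- position count, so a negative one is outside the natural domain; B's seq[polya_window+1]
-- index would wrap around or raise IndexError there.
def Pre_calc_longest_a (seq : String) (polya_window : Int) : Prop := 0 ≤ polya_window
instance (seq : String) (polya_window : Int) : Decidable (Pre_calc_longest_a seq polya_window) := by unfold Pre_calc_longest_a; infer_instance

def pvWitness_calc_longest_a : String × Int := ("AACAA", 3)

def Spec_calc_longest_a (seq : String) (polya_window : Int) (out : Int) : Prop := out = calc_longest_a_alt seq polya_window
instance (seq : String) (polya_window : Int) (out : Int) : Decidable (Spec_calc_longest_a seq polya_window out) := by unfold Spec_calc_longest_a; infer_instance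

-- ===== CLAIM (what is proved, stated in full; the proofs are below) =====
def Claim_equal_calc_longest_a : Prop := ∀ (seq : String) (polya_window : Int), Dom_calc_longest_a seq polya_window → Pre_calc_longest_a seq polya_window → Spec_calc_longest_a seq polya_window (calc_longest_a seq polya_window)

-- ===== LEMMAS AND PROOFS =====

-- A's loop with the window measured relative to the current index (pw - i)
def aLoopR (cs : List Char) (w : Int) (best curr : Int) : Int :=
  match cs with
  | [] => max best curr
  | c :: rest =>
    if c = 'A' then aLoopR rest (w - 1) best (curr + 1)
    else if w < 0 then max (max curr best) 0
    else aLoopR rest (w - 1) (max curr best) 0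

-- the truncation A's break effects: keep chars until a non-'A' at relative window < 0
def truncW (cs : List Char) (w : Int) : List Char :=
  match cs with
  | [] => []
  | c :: rest => if c = 'A' then c :: truncW rest (w - 1)
                 else if w < 0 then []
                 else c :: truncW rest (w - 1)

-- the pure (break-free) state machine
def mMach (cs : List Char) (best curr : Int) : Int :=
  match cs with
  | [] => max best curr
  | c :: rest => if c = 'A' then mMach rest best (curr + 1) else mMach rest (max curr best) 0

-- max-run with a carried current-run length
def mxRun (cs : List Char) (c : Int) : Int :=
  match cs with
  | [] => c
  | ch :: rest => if ch = 'A' then mxRun rest (c + 1) else max c (mxRun rest 0)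

theorem aLoop_shift (cs : List Char) (i best curr pw : Int) :
    calcALoop cs i best curr pw = aLoopR cs (pw - i) best curr := by
  induction cs generalizing i best curr with
  | nil => rfl
  | cons c rest ih =>
    rw [calcALoop, aLoopR]
    by_cases hA : c = 'A'
    · rw [if_pos hA, if_pos hA, ih]
      congr 1
      ring
    · rw [if_neg hA, if_neg hA]
      by_cases hb : i > pw
      · rw [if_pos hb, if_pos (by omega : pw - i < 0)]
      · rw [if_neg hb, if_neg (by omega : ¬ pw - i < 0), ih]
        congr 1
        ring

theorem aLoopR_trunc (cs : List Char) (w best curr : Int)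
    (hb : 0 ≤ best) (hc : 0 ≤ curr) :
    aLoopR cs w best curr = mMach (truncW cs w) best curr := by
  induction cs generalizing w best curr with
  | nil => rfl
  | cons c rest ih =>
    rw [aLoopR, truncW]
    by_cases hA : c = 'A'
    · rw [if_pos hA, if_pos hA, mMach, if_pos hA, ih _ _ _ hb (by omega)]
    · rw [if_neg hA, if_neg hA]
      by_cases hw : w < 0
      · rw [if_pos hw, if_pos hw, mMach]
        omega
      · rw [if_neg hw, if_neg hw, mMach, if_neg hA,
            ih _ _ _ (by omega) le_rfl]

theorem mMach_mxRun (cs : List Char) (best curr : Int) :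
    mMach cs best curr = max best (mxRun cs curr) := by
  induction cs generalizing best curr with
  | nil => rfl
  | cons c rest ih =>
    rw [mMach, mxRun]
    by_cases hA : c = 'A'
    · rw [if_pos hA, if_pos hA, ih]
    · rw [if_neg hA, if_neg hA, ih]
      omega

theorem mxRun_nonneg (cs : List Char) (c : Int) (hc : 0 ≤ c) : 0 ≤ mxRun cs c := by
  induction cs generalizing c with
  | nil => exact hc
  | cons ch rest ih =>
    rw [mxRun]
    by_cases hA : ch = 'A'
    · rw [if_pos hA]
      exact ih _ (by omega)
    · rw [if_neg hA]
      have := ih 0 le_rfl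
      omega

theorem take_takeWhile_len {α : Type} (p : α → Bool) (l : List α) :
    l.take (l.takeWhile p).length = l.takeWhile p := by
  induction l with
  | nil => rfl
  | cons x xs ih =>
    by_cases h : p x
    · simp [List.takeWhile_cons, h, ih]
    · simp [List.takeWhile_cons, h]

theorem truncW_split (cs : List Char) (w : Int) :
    truncW cs w = cs.take ((max (w + 1) 0).toNat) ++
      ((cs.drop ((max (w + 1) 0).toNat)).takeWhile (· = 'A')) := by
  induction cs generalizing w with
  | nil => simp [truncW]
  | cons c rest ih =>
    rw [truncW]
    by_cases hw : 0 ≤ w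
    · have hs : (max (w + 1) 0).toNat = (max (w - 1 + 1) 0).toNat + 1 := by omega
      rw [hs]
      simp only [List.take_succ_cons, List.drop_succ_cons]
      by_cases hA : c = 'A'
      · rw [if_pos hA, ih]
        simp
      · rw [if_neg hA, if_neg (by omega : ¬ w < 0), ih]
        simp
    · have hs : (max (w + 1) 0).toNat = 0 := by omega
      rw [hs]
      simp only [List.take_zero, List.drop_zero, List.nil_append]
      by_cases hA : c = 'A'
      · have hs' : (max (w - 1 + 1) 0).toNat = 0 := by omega
        rw [if_pos hA, ih, hs']
        simp only [List.take_zero, List.drop_zero, List.nil_append]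
        simp [List.takeWhile_cons, hA]
      · rw [if_neg hA, if_pos (by omega : w < 0)]
        simp [List.takeWhile_cons, hA]

theorem bAdvance_spec (l : List Char) (p : Nat) :
    bAdvance l p = p + (l.takeWhile (· = 'A')).length := by
  induction l generalizing p with
  | nil => simp [bAdvance]
  | cons c t ih =>
    rw [bAdvance, List.takeWhile_cons]
    by_cases hA : c = 'A'
    · simp only [hA, decide_true, if_true, List.length_cons, ih]
      omega
    · simp [hA]

theorem bRunSkip_spec (l : List Char) :
    (∀ best : Int, 0 ≤ best → bSkip l best = max best (mxRun l 0)) ∧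
    (∀ k best : Int, 0 ≤ best → 0 ≤ k → bRun l k best = max best (mxRun l k)) := by
  induction l with
  | nil =>
    constructor
    · intro best hb; rw [bSkip, mxRun]; omega
    · intro k best hb hk; rw [bRun, mxRun]
  | cons c t ih =>
    constructor
    · intro best hb
      rw [bSkip, mxRun]
      by_cases hA : c = 'A'
      · rw [if_pos hA, if_pos hA, ih.2 1 best hb (by omega)]
        norm_num
      · rw [if_neg hA, if_neg hA, ih.1 best hb]
        have := mxRun_nonneg t 0 le_rfl
        omega
    · intro k best hb hk
      rw [bRun, mxRun]
      by_cases hA : c = 'A'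
      · rw [if_pos hA, if_pos hA, ih.2 (k + 1) best hb (by omega)]
      · rw [if_neg hA, if_neg hA, ih.1 (max best k) (by omega)]
        have := mxRun_nonneg t 0 le_rfl
        omega

-- ===== VERDICT (by name: the statement is the Claim_ definition above) =====
theorem calc_longest_a_spec : Claim_equal_calc_longest_a := by
  intro seq pw _ hpre
  unfold Spec_calc_longest_a calc_longest_a calc_longest_a_alt
  set cs := seq.toList with hcs
  rw [aLoop_shift, aLoopR_trunc _ _ _ _ le_rfl le_rfl, mMach_mxRun,
      (bRunSkip_spec _).1 0 le_rfl, bAdvance_spec]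
  have hs : (pw + 1).toNat = (max (pw + 1) 0).toNat := by
    unfold Pre_calc_longest_a at hpre
    omega
  rw [hs]
  set s : Nat := (max (pw + 1) 0).toNat with hsdef
  have htake : cs.take (s + ((cs.drop s).takeWhile (· = 'A')).length) =
      cs.take s ++ (cs.drop s).takeWhile (· = 'A') := by
    rw [List.take_add]
    congr 1
    exact take_takeWhile_len _ _
  rw [htake]
  have hT := truncW_split cs pw
  simp only [sub_zero]
  rw [hT]
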